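-- pv_equiv track=rewrite | github.com/mayank88-py/leetcode-top-interview-150 | binary_search/074_search_a_2d_matrix.py | search_matrix_staircase
-- ===== SOURCE A (Python) =====
-- def search_matrix_staircase(matrix, target):
--     """
--     Approach 3: Staircase Search
--     Time Complexity: O(m + n)
--     Space Complexity: O(1)
--
--     Start from top-right corner and move left or down based on comparison.
--     This works because of the sorted property.
--     """
--     if not matrix or not matrix[0]:
--         return False
--
--     m, n = len(matrix), len(matrix[0])
--     row, col = 0, n - 1
--
--     while row < m and col >= 0:
--         current = matrix[row][col]
--
--         if current == target:
--             return True
--         elif current > target: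
--             col -= 1  # Move left
--         else:
--             row += 1  # Move down
--
--     return False
-- ===== SOURCE B (Python) =====
-- def search_matrix_staircase(matrix, target):
--     if not matrix:
--         return False
--     width = len(matrix[0])
--     for row in matrix:
--         prefix = row[:width]
--         while prefix and prefix[-1] > target:
--             prefix.pop()
--         if not prefix:
--             return False
--         if prefix[-1] == target:
--             return True
--         width = len(prefix)
--     return False
-- ===== Notes on version B (the rewrite author's own statement) =====
-- stated objective: alternative
-- what changed: Replaces A's single top-right pointer walk over (row, col) indices with a row-by-row loop that carries a shrinking row prefix as a list, popping its last element while it exceeds the target, then deciding on the prefix's last element.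
-- outside the precondition, e.g. on search_matrix_staircase([[1, 2], [3]], 0): A returns False, B returns False
import Mathlib
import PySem

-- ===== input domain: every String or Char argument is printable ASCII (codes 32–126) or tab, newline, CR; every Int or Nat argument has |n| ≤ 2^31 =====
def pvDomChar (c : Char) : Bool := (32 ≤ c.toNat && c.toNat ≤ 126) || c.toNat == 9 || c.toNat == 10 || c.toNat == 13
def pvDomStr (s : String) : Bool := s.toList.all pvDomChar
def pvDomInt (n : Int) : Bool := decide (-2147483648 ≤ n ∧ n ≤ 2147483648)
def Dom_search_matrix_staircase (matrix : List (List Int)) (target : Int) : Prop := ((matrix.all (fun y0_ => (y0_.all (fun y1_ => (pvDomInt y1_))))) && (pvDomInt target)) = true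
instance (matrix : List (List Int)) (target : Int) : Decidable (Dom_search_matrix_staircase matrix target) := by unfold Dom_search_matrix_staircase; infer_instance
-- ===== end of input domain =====

-- B re-decomposes A's single staircase walk into a row-by-row loop that keeps a shrinking row
-- prefix as a list and pops its last element while it exceeds the target (objective: alternative;
-- same return value, no observable mutation in either program).

-- ===== PORT A =====
-- Indexing uses pyGetD: within Pre_ every index A touches is in range, so the default is never read
-- (on rows shorter than the first row Python A can raise IndexError; those inputs are outside Pre_).
def pvAloop (matrix : List (List Int)) (m target row col : Int) : Bool :=
  if h : row < m ∧ 0 ≤ col then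
    let current := PySem.List.pyGetD (PySem.List.pyGetD matrix row []) col 0
    if current = target then true
    else if current > target then pvAloop matrix m target row (col - 1)
    else pvAloop matrix m target (row + 1) col
  else false
termination_by ((m - row) + (col + 1)).toNat
decreasing_by all_goals omega

def search_matrix_staircase (matrix : List (List Int)) (target : Int) : Bool :=
  if matrix = [] ∨ matrix.headD [] = [] then false
  else
    pvAloop matrix (matrix.length : Int) target 0 (((matrix.headD []).length : Int) - 1)

-- ===== PORT B =====
-- while prefix and prefix[-1] > target: prefix.pop()
def pvPopTail (target : Int) (p : List Int) : List Int :=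
  if p = [] then p
  else if p.getLastD 0 > target then pvPopTail target p.dropLast
  else p
termination_by p.length
decreasing_by
  rename_i hp _
  have := List.length_pos_of_ne_nil hp
  simp only [List.length_dropLast]
  omega

def pvBrows (target : Int) : List (List Int) → Nat → Bool
  | [], _ => false
  | row :: rest, width =>
    let p := pvPopTail target (PySem.List.slice row none (some (width : Int)))
    if p = [] then false
    else if p.getLastD 0 = target then true
    else pvBrows target rest p.length

def search_matrix_staircase_alt (matrix : List (List Int)) (target : Int) : Bool :=
  if matrix = [] then false
  else pvBrows target matrix (matrix.headD []).length

-- ===== PRECONDITION & SPEC =====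
-- Pre_ excludes matrices containing a row shorter than the first row: on some of those Python A
-- raises IndexError when its walk reaches the short row (inside Pre_ A always returns).
def Pre_search_matrix_staircase (matrix : List (List Int)) (target : Int) : Prop :=
  ∀ row ∈ matrix, (matrix.headD []).length ≤ row.length
instance (matrix : List (List Int)) (target : Int) : Decidable (Pre_search_matrix_staircase matrix target) := by unfold Pre_search_matrix_staircase; infer_instance

def pvWitness_search_matrix_staircase : List (List Int) × Int := ([[1, 3], [5, 7]], 3)

def Spec_search_matrix_staircase (matrix : List (List Int)) (target : Int) (out : Bool) : Prop := out = search_matrix_staircase_alt matrix target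
instance (matrix : List (List Int)) (target : Int) (out : Bool) : Decidable (Spec_search_matrix_staircase matrix target out) := by unfold Spec_search_matrix_staircase; infer_instance

-- ===== CLAIM (what is proved, stated in full; the proofs are below) =====
def Claim_equal_search_matrix_staircase : Prop := ∀ (matrix : List (List Int)) (target : Int), Dom_search_matrix_staircase matrix target → Pre_search_matrix_staircase matrix target → Spec_search_matrix_staircase matrix target (search_matrix_staircase matrix target)

-- ===== LEMMAS AND PROOFS =====

lemma pvPopTail_length_le (target : Int) : ∀ (k : Nat) (p : List Int), p.length ≤ k →
    (pvPopTail target p).length ≤ p.length := by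
  intro k
  induction k with
  | zero =>
    intro p hp
    have hnil : p = [] := by cases p with | nil => rfl | cons a l => simp at hp
    rw [hnil, pvPopTail]
    simp
  | succ k ih =>
    intro p hp
    rw [pvPopTail]
    split_ifs with h1 h2
    · exact le_rfl
    · have hdl := p.length_dropLast
      have hpos := List.length_pos_of_ne_nil h1
      have := ih p.dropLast (by omega)
      omega
    · exact le_rfl

-- A's walk restricted to one row equals "pop the prefix's tail while it exceeds target, then decide"
lemma pvInner (matrix : List (List Int)) (target : Int) (r : Int)
    (hrm : r < (matrix.length : Int)) :
    ∀ (k : Nat) (c : Int), c + 1 = (k : Int) →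
    c < ((PySem.List.pyGetD matrix r []).length : Int) →
    pvAloop matrix (matrix.length : Int) target r c =
      (if pvPopTail target ((PySem.List.pyGetD matrix r []).take k) = [] then false
       else if (pvPopTail target ((PySem.List.pyGetD matrix r []).take k)).getLastD 0 = target then true
       else pvAloop matrix (matrix.length : Int) target (r + 1)
         (((pvPopTail target ((PySem.List.pyGetD matrix r []).take k)).length : Int) - 1)) := by
  intro k
  induction k with
  | zero =>
    intro c hc _
    have hcneg : ¬ (0 ≤ c) := by omega
    rw [pvAloop, dif_neg (by tauto)]
    have hnil : pvPopTail target ([] : List Int) = [] := by rw [pvPopTail]; simp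
    simp [hnil]
  | succ k ih =>
    intro c hc hclen
    set R := PySem.List.pyGetD matrix r [] with hR
    have hc0 : 0 ≤ c := by omega
    have hkc : c.toNat = k := by omega
    have hklen : k < R.length := by omega
    have hcur : PySem.List.pyGetD R c 0 = R.getD k 0 := by
      rw [PySem.List.pyGetD_of_nonneg _ _ hc0, hkc]
    have htake : R.take (k + 1) = R.take k ++ [R[k]] := List.take_succ_eq_append_getElem hklen
    have hlast : (R.take (k + 1)).getLastD 0 = R.getD k 0 := by
      rw [htake, List.getLastD_concat, List.getD_eq_getElem R 0 hklen]
    have hne : R.take (k + 1) ≠ [] := by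
      have hlt : (R.take (k + 1)).length = min (k + 1) R.length := R.length_take
      intro h
      rw [h] at hlt
      simp at hlt
      omega
    rw [pvAloop, dif_pos ⟨hrm, hc0⟩]
    simp only [← hR, hcur]
    by_cases h1 : R.getD k 0 = target
    · -- found: the popped prefix still ends with the target
      rw [if_pos h1]
      have hpop : pvPopTail target (R.take (k + 1)) = R.take (k + 1) := by
        rw [pvPopTail, if_neg hne, if_neg (by rw [hlast, h1]; omega)]
      simp only [hpop, if_neg hne, hlast, if_pos h1]
    · rw [if_neg h1]
      by_cases h2 : R.getD k 0 > target
      · -- move left = pop the last element of the prefix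
        rw [if_pos h2]
        have hpop : pvPopTail target (R.take (k + 1)) = pvPopTail target (R.take k) := by
          rw [pvPopTail, if_neg hne, if_pos (by rw [hlast]; exact h2), htake,
            List.dropLast_concat]
        rw [ih (c - 1) (by omega) (by omega)]
        simp only [hpop]
      · -- move down: the prefix survives and its length is c + 1
        rw [if_neg h2]
        have hpop : pvPopTail target (R.take (k + 1)) = R.take (k + 1) := by
          rw [pvPopTail, if_neg hne, if_neg (by rw [hlast]; exact h2)]
        have hlen : (R.take (k + 1)).length = k + 1 := by
          simp [List.length_take]; omega
        simp only [hpop, if_neg hne, hlast, if_neg h1, hlen]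
        have : ((k : Int) + 1) - 1 = c := by omega
        norm_num [this]

-- the whole walk equals B's row loop, given every remaining row is long enough
lemma pvOuter (matrix : List (List Int)) (target : Int) (n : Nat)
    (hlen : ∀ row ∈ matrix, n ≤ row.length) :
    ∀ (d r : Nat), matrix.length - r = d → r ≤ matrix.length → ∀ width : Nat, width ≤ n →
    pvAloop matrix (matrix.length : Int) target (r : Int) ((width : Int) - 1) =
      pvBrows target (matrix.drop r) width := by
  intro d
  induction d with
  | zero =>
    intro r hd hr width hw
    have hr' : r = matrix.length := by omega
    rw [pvAloop, dif_neg (by subst hr'; push Not; intro h; omega)]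
    rw [hr', List.drop_length, pvBrows]
  | succ d ih =>
    intro r hd hr width hw
    have hrlt : r < matrix.length := by omega
    have hdrop : matrix.drop r = matrix[r] :: matrix.drop (r + 1) := List.drop_eq_getElem_cons hrlt
    have hRget : PySem.List.pyGetD matrix (r : Int) [] = matrix[r] := by
      rw [PySem.List.pyGetD_natCast, List.getD_eq_getElem matrix [] hrlt]
    have hRlen : n ≤ matrix[r].length := hlen _ (List.getElem_mem hrlt)
    have hA := pvInner matrix target (r : Int) (by exact_mod_cast hrlt)
      width ((width : Int) - 1) (by omega) (by rw [hRget]; omega)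
    rw [hA, hdrop, pvBrows]
    simp only [hRget, PySem.List.slice_to_natCast]
    have hple : (pvPopTail target (matrix[r].take width)).length ≤ width := by
      have h1 := pvPopTail_length_le target (matrix[r].take width).length
        (matrix[r].take width) le_rfl
      have h2 : (matrix[r].take width).length = min width matrix[r].length :=
        List.length_take
      omega
    have hrec := ih (r + 1) (by omega) (by omega)
      ((pvPopTail target (matrix[r].take width)).length) (by omega)
    have hcast : ((r : Int) + 1) = (((r + 1 : Nat)) : Int) := by push_cast; ring
    rw [hcast, hrec]

-- ===== VERDICT (by name: the statement is the Claim_ definition above) =====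
theorem search_matrix_staircase_spec : Claim_equal_search_matrix_staircase := by
  intro matrix target _ hpre
  unfold Spec_search_matrix_staircase Pre_search_matrix_staircase at *
  by_cases hnil : matrix = []
  · rw [search_matrix_staircase, if_pos (Or.inl hnil), search_matrix_staircase_alt, if_pos hnil]
  · rw [search_matrix_staircase_alt, if_neg hnil]
    by_cases hhead : matrix.headD [] = []
    · rw [search_matrix_staircase, if_pos (Or.inr hhead)]
      obtain ⟨R, rest, rfl⟩ := List.exists_cons_of_ne_nil hnil
      have hR : R = [] := by simpa using hhead
      subst hR
      simp [pvBrows, pvPopTail, PySem.List.slice]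
    · rw [search_matrix_staircase, if_neg (by tauto)]
      have := pvOuter matrix target (matrix.headD []).length hpre
        matrix.length 0 (by omega) (by omega) (matrix.headD []).length le_rfl
      simpa using this
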